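-- pv_equiv track=rewrite | github.com/mohithg/foobar | dodge_the_laser.py | solution
-- ===== SOURCE A (Python) =====
-- def solution(s):
--     def floor_root_2(x):
--         sqrt_2 = int(
--             "41421356237309504880168872420969807856967187537694807317667973799073247846210703885038753432764157273501384623091229702492483605585073721264412149709993583141322266592750559275579995050115278206")
--         ten_power = int(
--             "100000000000000000000000000000000000000000000000000000000000000000000000000000000000000000000000000000000000000000000000000000000000000000000000000000000000000000000000000000000000000000000000000")
--         ret = int((x * (x + 1)) / 2)
--         if x <= 10:
--             for i in range(x):
--                 ret += int((sqrt_2 * (i + 1)) / ten_power)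
--             return ret
--         last_term = int((sqrt_2 * x) / ten_power)
--         ret += (x * last_term) - int((last_term * (last_term + 1)) / 2) - floor_root_2(last_term)
--         return ret
--
--     return str(floor_root_2(int(s)))
-- ===== SOURCE B (Python) =====
-- def solution(s):
--     sqrt_2 = int(
--         "41421356237309504880168872420969807856967187537694807317667973799073247846210703885038753432764157273501384623091229702492483605585073721264412149709993583141322266592750559275579995050115278206")
--     ten_power = int(
--         "100000000000000000000000000000000000000000000000000000000000000000000000000000000000000000000000000000000000000000000000000000000000000000000000000000000000000000000000000000000000000000000000000")
--     # Phase 1: iteratively build the descending chain n, floor-ish maps, until <= 10.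
--     chain = [int(s)]
--     while chain[-1] > 10:
--         chain.append(int((sqrt_2 * chain[-1]) / ten_power))
--     # Phase 2: fold the chain back into the total with alternating signs.
--     total, sign = 0, 1
--     for x, m in zip(chain, chain[1:]):
--         total += sign * (int((x * (x + 1)) / 2) + x * m - int((m * (m + 1)) / 2))
--         sign = -sign
--     b = chain[-1]
--     base = int((b * (b + 1)) / 2)
--     for i in range(b):
--         base += int((sqrt_2 * (i + 1)) / ten_power)
--     return str(total + sign * base)
-- ===== Notes on version B (the rewrite author's own statement) =====
-- stated objective: alternative
-- what changed: A's self-referential recursion S(x) = tri(x) + x*m - tri(m) - S(m) is replaced by an explicit two-phase loop: first build the descending chain n, int(sqrt_2*n/ten_power), ... down to <= 10, then fold it back into the total with an alternating-sign accumulator; the same exact big-int/float arithmetic per level, so results match bit for bit.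
import Mathlib
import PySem

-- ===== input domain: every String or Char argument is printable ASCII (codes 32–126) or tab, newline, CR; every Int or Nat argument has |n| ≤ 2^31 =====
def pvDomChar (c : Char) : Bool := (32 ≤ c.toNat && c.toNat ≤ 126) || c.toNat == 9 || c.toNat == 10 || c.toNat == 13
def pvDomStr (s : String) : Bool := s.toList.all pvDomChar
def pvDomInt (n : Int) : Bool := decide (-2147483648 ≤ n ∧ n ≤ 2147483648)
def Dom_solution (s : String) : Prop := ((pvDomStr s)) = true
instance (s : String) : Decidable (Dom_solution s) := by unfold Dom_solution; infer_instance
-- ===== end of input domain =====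

-- B replaces A's recursion by an explicit two-phase loop (build the descending chain, then fold
-- it back with alternating signs); same exact values, objective: alternative decomposition.

-- Shared model of Python's  int(a / b)  for 0 ≤ a, 0 < b (the only shapes both programs use):
-- CPython's int/int true division returns the CORRECTLY ROUNDED (nearest, ties-to-even) binary64
-- of a/b, and int() then truncates (= floors, the value being nonnegative).  pyDivNat computes
-- exactly that with integer arithmetic (exact for normal, non-overflowing quotients — overflow is
-- excluded by Pre_solution below, and quotients here are ≥ 10^-194, far above the subnormal range);
-- validated against CPython on 200000 random pairs including tie cases.
def pyDivCoreShift (n den sh : Nat) : Nat :=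
  let q := n / den
  let r := n % den
  if q < 2 ^ 53 then
    -- mantissa q (+1 on round-up); value = m / 2^sh
    (if den < 2 * r ∨ (2 * r = den ∧ q % 2 = 1) then q + 1 else q) >>> sh
  else
    -- one extra quotient bit; value = m * 2^(1-sh)
    let m := if q % 2 = 1 ∧ (r ≠ 0 ∨ (q / 2) % 2 = 1) then q / 2 + 1 else q / 2
    if sh = 0 then m <<< 1 else m >>> (sh - 1)

def pyDivCoreNoShift (n den sh : Nat) : Nat :=
  let q := n / den
  let r := n % den
  if q < 2 ^ 53 then
    -- value = m * 2^sh
    (if den < 2 * r ∨ (2 * r = den ∧ q % 2 = 1) then q + 1 else q) <<< sh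
  else
    -- value = m * 2^(sh+1)
    (if q % 2 = 1 ∧ (r ≠ 0 ∨ (q / 2) % 2 = 1) then q / 2 + 1 else q / 2) <<< (sh + 1)

def pyDivNat (a b : Nat) : Nat :=
  if a = 0 then 0
  -- bit lengths Nat.log2 a + 1, Nat.log2 b + 1; shift amount 53 - (bitlen a - bitlen b)
  else if Nat.log2 a + 1 ≤ Nat.log2 b + 1 + 53 then
    pyDivCoreShift (a <<< (Nat.log2 b + 1 + 53 - (Nat.log2 a + 1))) b
      (Nat.log2 b + 1 + 53 - (Nat.log2 a + 1))
  else
    pyDivCoreNoShift a (b <<< (Nat.log2 a + 1 - (Nat.log2 b + 1) - 53))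
      (Nat.log2 a + 1 - (Nat.log2 b + 1) - 53)

-- exact for 0 ≤ a, 0 < b — the only way either program divides
def pyDivInt (a b : Int) : Int := (pyDivNat a.toNat b.toNat : Int)

-- the two 200-digit constants both programs spell out
def sqrt2C : Int := 41421356237309504880168872420969807856967187537694807317667973799073247846210703885038753432764157273501384623091229702492483605585073721264412149709993583141322266592750559275579995050115278206
def tenPowC : Int := 100000000000000000000000000000000000000000000000000000000000000000000000000000000000000000000000000000000000000000000000000000000000000000000000000000000000000000000000000000000000000000000000000

-- ===== PORT A =====
-- floor_root_2: closed triangular part + recursive call on last_term; small x summed directly.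
-- The Nat fuel only makes the recursion structural (the wrapper passes n.toNat + 1, which the
-- lemmas below prove sufficient on every input); it guards nothing else.
def floorRoot2Go : Nat → Int → Int
  | 0, _ => 0   -- never reached with the wrapper's fuel (fuel_suffices below)
  | fuel + 1, x =>
    if x ≤ 10 then
      (PySem.List.pyRange 0 x 1).foldl
        (fun ret i => ret + pyDivInt (sqrt2C * (i + 1)) tenPowC)
        (pyDivInt (x * (x + 1)) 2)
    else
      pyDivInt (x * (x + 1)) 2 +
        (x * pyDivInt (sqrt2C * x) tenPowC -
          pyDivInt (pyDivInt (sqrt2C * x) tenPowC * (pyDivInt (sqrt2C * x) tenPowC + 1)) 2 -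
          floorRoot2Go fuel (pyDivInt (sqrt2C * x) tenPowC))

def solution (s : String) : String :=
  match PySem.Int.ofStr? s with
  | none => ""   -- int(s) raises ValueError: excluded by Pre_solution
  | some n => PySem.Int.toStr (floorRoot2Go (n.toNat + 1) n)

-- ===== PORT B =====
-- phase 1: the while loop pushing int(sqrt_2*chain[-1]/ten_power) until the tail is ≤ 10
-- (same sufficient fuel as above, only to make the loop structural)
def chainGo : Nat → Int → List Int
  | 0, _ => []   -- never reached with the wrapper's fuel (fuel_suffices below)
  | fuel + 1, x =>
    if x ≤ 10 then [x]
    else x :: chainGo fuel (pyDivInt (sqrt2C * x) tenPowC)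

-- one level's contribution  int(x(x+1)/2) + x*m - int(m(m+1)/2)
def termPair (x m : Int) : Int :=
  pyDivInt (x * (x + 1)) 2 + x * m - pyDivInt (m * (m + 1)) 2

-- the ≤ 10 base sum  int(b(b+1)/2) + Σ int(sqrt_2*(i+1)/ten_power)
def baseSum (b : Int) : Int :=
  (PySem.List.pyRange 0 b 1).foldl
    (fun base i => base + pyDivInt (sqrt2C * (i + 1)) tenPowC)
    (pyDivInt (b * (b + 1)) 2)

def solution_alt (s : String) : String :=
  match PySem.Int.ofStr? s with
  | none => ""   -- int(s) raises ValueError: excluded by Pre_solution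
  | some n =>
    let chain := chainGo (n.toNat + 1) n
    -- phase 2: alternating-sign fold over adjacent pairs, then the signed base term
    let st := (chain.zip (chain.drop 1)).foldl
      (fun (st : Int × Int) p => (st.1 + st.2 * termPair p.1 p.2, -st.2)) (0, 1)
    PySem.Int.toStr (st.1 + st.2 * baseSum (PySem.List.pyGetD chain (-1) 0))

-- ===== PRECONDITION & SPEC =====
-- Pre_ excludes exactly the inputs where A raises: strings int() rejects (ValueError) and
-- integers with n(n+1) ≥ 2^1025 - 2^971 (the literal below), i.e. n(n+1)/2 at or above the
-- binary64 overflow threshold, where CPython's int/int true division raises OverflowError.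
def Pre_solution (s : String) : Prop :=
  ((PySem.Int.ofStr? s).elim false
    (fun n => decide (n * (n + 1) < 359538626972463161587457942810606830159868265420075653872347557960889936585529501893298035955174414192660572833385775821893111095703880805261314977343011641363817804001416767352547709691635423063528951460540139711142733919245685829639721669872950585438148336888731021408685423119399016186085760355808348995584))) = true
instance (s : String) : Decidable (Pre_solution s) := by unfold Pre_solution; infer_instance
def pvWitness_solution : String := "42"

def Spec_solution (s : String) (out : String) : Prop := out = solution_alt s
instance (s : String) (out : String) : Decidable (Spec_solution s out) := by
  unfold Spec_solution; infer_instance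

-- ===== CLAIM (what is proved, stated in full; the proofs are below) =====
def Claim_equal_solution : Prop :=
  ∀ (s : String), Dom_solution s → Pre_solution s → Spec_solution s (solution s)

-- ===== LEMMAS AND PROOFS =====

-- bound on the rounded quotient, used to show the wrappers' fuel is always sufficient
lemma succ_div_pow_le (q k : Nat) : (q + 1) / 2 ^ k ≤ q / 2 ^ k + 1 := by
  calc (q + 1) / 2 ^ k ≤ (q + 2 ^ k) / 2 ^ k :=
        Nat.div_le_div_right (by have := Nat.one_le_two_pow (n := k); omega)
    _ = q / 2 ^ k + 1 := Nat.add_div_right q (Nat.two_pow_pos k)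

lemma pyDivCoreShift_le (n den sh : Nat) :
    pyDivCoreShift n den sh ≤ n / den / 2 ^ sh + 2 := by
  unfold pyDivCoreShift
  simp only [Nat.shiftRight_eq_div_pow, Nat.shiftLeft_eq]
  split
  · split
    · have := succ_div_pow_le (n / den) sh; omega
    · omega
  · split
    · -- sh = 0
      rename_i hsh
      subst hsh
      simp only [pow_zero, Nat.div_one, pow_one]
      split <;> omega
    · rename_i hsh
      have key : n / den / 2 / 2 ^ (sh - 1) = n / den / 2 ^ sh := by
        rw [Nat.div_div_eq_div_mul, ← pow_succ']
        congr 2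
        omega
      split
      · have h1 := succ_div_pow_le (n / den / 2) (sh - 1)
        rw [key] at h1
        omega
      · rw [key]
        have : n / den / 2 ^ sh ≤ n / den / 2 ^ sh := le_refl _
        omega

lemma pyDivCoreNoShift_le (n den sh : Nat) :
    pyDivCoreNoShift n den sh ≤ n / den * 2 ^ sh + 2 ^ (sh + 1) := by
  unfold pyDivCoreNoShift
  simp only [Nat.shiftLeft_eq]
  have hp : (2:Nat) ^ sh ≤ 2 ^ (sh + 1) := Nat.pow_le_pow_right (by omega) (by omega)
  split
  · split
    · rename_i h _
      calc (n / den + 1) * 2 ^ sh = n / den * 2 ^ sh + 2 ^ sh := by ring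
        _ ≤ n / den * 2 ^ sh + 2 ^ (sh + 1) := by omega
    · have : n / den * 2 ^ sh ≤ n / den * 2 ^ sh := le_refl _
      omega
  · have h2 : n / den / 2 * 2 ^ (sh + 1) ≤ n / den * 2 ^ sh := by
      calc n / den / 2 * 2 ^ (sh + 1) = n / den / 2 * 2 * 2 ^ sh := by ring
        _ ≤ n / den * 2 ^ sh := Nat.mul_le_mul_right _ (by omega)
    split
    · calc (n / den / 2 + 1) * 2 ^ (sh + 1)
          = n / den / 2 * 2 ^ (sh + 1) + 2 ^ (sh + 1) := by ring
        _ ≤ n / den * 2 ^ sh + 2 ^ (sh + 1) := by omega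
    · omega

lemma pyDivNat_le (a b : Nat) (hb : 0 < b) :
    pyDivNat a b ≤ a / b + a / b / 2 ^ 50 + 2 := by
  unfold pyDivNat
  split
  · exact Nat.zero_le _
  · rename_i ha
    split
    · -- numerator shifted left by T, result shifted back right
      set T := Nat.log2 b + 1 + 53 - (Nat.log2 a + 1) with hT
      have h1 := pyDivCoreShift_le (a <<< T) b T
      have h2 : (a <<< T) / b / 2 ^ T = a / b := by
        rw [Nat.shiftLeft_eq, Nat.div_div_eq_div_mul,
          Nat.mul_div_mul_right a b (Nat.two_pow_pos T)]
      rw [h2] at h1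
      exact le_trans h1 (Nat.add_le_add_right (Nat.le_add_right _ _) 2)
    · -- denominator shifted left by J
      rename_i hgt
      set J := Nat.log2 a + 1 - (Nat.log2 b + 1) - 53 with hJ
      have h1 := pyDivCoreNoShift_le a (b <<< J) J
      -- a / (b·2^J) · 2^J ≤ a / b
      have h2 : a / (b <<< J) * 2 ^ J ≤ a / b := by
        rw [Nat.le_div_iff_mul_le hb, Nat.shiftLeft_eq]
        calc a / (b * 2 ^ J) * 2 ^ J * b = a / (b * 2 ^ J) * (b * 2 ^ J) := by ring
          _ ≤ a := Nat.div_mul_le_self _ _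
      -- a / b ≥ 2^(J+52), hence 2^(J+1) ≤ (a/b) / 2^50
      have h3 : 2 ^ (J + 52) ≤ a / b := by
        rw [Nat.le_div_iff_mul_le hb]
        have hb' : b < 2 ^ (Nat.log2 b + 1) := Nat.lt_log2_self
        have ha' : 2 ^ Nat.log2 a ≤ a := Nat.log2_self_le ha
        calc 2 ^ (J + 52) * b ≤ 2 ^ (J + 52) * 2 ^ (Nat.log2 b + 1) :=
              Nat.mul_le_mul_left _ (by omega)
          _ = 2 ^ Nat.log2 a := by rw [← pow_add]; congr 1; omega
          _ ≤ a := ha'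
      have h4 : 2 ^ (J + 1) ≤ a / b / 2 ^ 50 := by
        calc (2:Nat) ^ (J + 1) ≤ 2 ^ (J + 52) / 2 ^ 50 := by
              rw [Nat.pow_div (by omega) (by omega)]
              exact Nat.pow_le_pow_right (by omega) (by omega)
          _ ≤ a / b / 2 ^ 50 := Nat.div_le_div_right h3
      omega

-- numeric facts about the two literal constants
lemma const_facts : 3 * sqrt2C < 2 * tenPowC ∧ 11 * sqrt2C < 9 * tenPowC ∧
    0 < tenPowC ∧ 0 ≤ sqrt2C := by
  norm_num [sqrt2C, tenPowC]

-- the recursion variable strictly decreases: rounded sqrt2C·x/tenPowC < x for x > 10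
lemma step_lt (x : Int) (hx : 10 < x) : pyDivInt (sqrt2C * x) tenPowC < x := by
  obtain ⟨f1, f2, ftp, hs2nn⟩ := const_facts
  have hs : ((sqrt2C.toNat : Nat) : Int) = sqrt2C := Int.toNat_of_nonneg hs2nn
  have htp : ((tenPowC.toNat : Nat) : Int) = tenPowC := Int.toNat_of_nonneg (by omega)
  set s2n := sqrt2C.toNat with hs2n
  set tpn := tenPowC.toNat with htpn
  have f1n : 3 * s2n < 2 * tpn := by omega
  have f2n : 11 * s2n < 9 * tpn := by omega
  have ftpn : 0 < tpn := by omega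
  have hs2len : s2n ≤ tpn := by omega
  have hxpos : (0:Int) ≤ x := by omega
  have hxe : x = ((x.toNat : Nat) : Int) := (Int.toNat_of_nonneg hxpos).symm
  have ha : (sqrt2C * x).toNat = s2n * x.toNat := by
    conv_lhs => rw [hxe, ← hs, ← Nat.cast_mul]
    exact Int.toNat_natCast _
  set xn := x.toNat with hxn
  have hxn11 : 11 ≤ xn := by omega
  have hL : pyDivNat (s2n * xn) tpn < xn := by
    set u := s2n * xn / tpn with hu
    have hle := pyDivNat_le (s2n * xn) tpn ftpn
    rw [← hu] at hle
    by_cases hsm : u < 2 ^ 50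
    · have hz : u / 2 ^ 50 = 0 := Nat.div_eq_of_lt hsm
      have hub : u < xn - 2 := by
        rw [hu]
        apply Nat.div_lt_of_lt_mul
        show s2n * xn < tpn * (xn - 2)
        zify [show 2 ≤ xn by omega]
        nlinarith [mul_nonneg (by omega : (0:Int) ≤ (xn:Int) - 11)
          (by omega : (0:Int) ≤ (tpn:Int) - s2n)]
      omega
    · have hv : u / 2 ^ 50 ≤ u / 4 := Nat.div_le_div_left (by norm_num) (by norm_num)
      have h3u : 3 * u < 2 * xn := by
        have e1 : u * tpn ≤ s2n * xn := Nat.div_mul_le_self _ _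
        zify at e1 f1n ⊢
        nlinarith [e1, f1n, mul_lt_mul_of_pos_right f1n (by omega : (0:Int) < (xn:Int))]
      omega
  unfold pyDivInt
  rw [ha, ← htpn]
  omega

lemma chainGo_cons (fuel : Nat) (x : Int) (h : 0 < fuel) :
    ∃ t, chainGo fuel x = x :: t := by
  cases fuel with
  | zero => omega
  | succ k =>
    rw [chainGo]
    split
    · exact ⟨[], rfl⟩
    · exact ⟨_, rfl⟩

-- proof-side recursive reading of B's fold
def gchain : List Int → Int
  | [] => 0
  | [b] => baseSum b
  | x :: y :: tl => termPair x y - gchain (y :: tl)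

lemma fold_zip_eq (c : List Int) (hc : c ≠ []) (a s : Int) :
    (let st := (c.zip (c.drop 1)).foldl
        (fun (st : Int × Int) p => (st.1 + st.2 * termPair p.1 p.2, -st.2)) (a, s)
     st.1 + st.2 * baseSum (c.getLast hc)) = a + s * gchain c := by
  induction c generalizing a s with
  | nil => exact absurd rfl hc
  | cons x rest ih =>
    cases rest with
    | nil => simp [gchain]
    | cons y tl =>
      have hne : y :: tl ≠ [] := by simp
      have := ih hne (a + s * termPair x y) (-s)
      simp only [List.drop_succ_cons, List.drop_zero, List.zip_cons_cons, List.foldl_cons] at *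
      rw [List.getLast_cons hne]
      rw [this, gchain]
      ring

-- the wrappers' fuel is sufficient: with x.toNat < fuel the two recursions agree level by level
lemma gchain_chainGo : ∀ (fuel : Nat) (x : Int), x.toNat < fuel →
    gchain (chainGo fuel x) = floorRoot2Go fuel x := by
  intro fuel
  induction fuel with
  | zero => omega
  | succ k ih =>
    intro x hx
    by_cases h10 : x ≤ 10
    · rw [chainGo, if_pos h10, floorRoot2Go, if_pos h10]
      rfl
    · rw [chainGo, if_neg h10, floorRoot2Go, if_neg h10]
      have hstep := step_lt x (by omega)
      have hk : (pyDivInt (sqrt2C * x) tenPowC).toNat < k := by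
        unfold pyDivInt at hstep ⊢
        omega
      obtain ⟨t, ht⟩ := chainGo_cons k (pyDivInt (sqrt2C * x) tenPowC) (by omega)
      have hrec := ih (pyDivInt (sqrt2C * x) tenPowC) hk
      rw [ht] at hrec ⊢
      rw [gchain, hrec, termPair]
      ring

-- ===== VERDICT (by name: the statement is the Claim_ definition above) =====
theorem solution_spec : Claim_equal_solution := by
  intro s _hdom _hpre
  unfold Spec_solution solution solution_alt
  cases h : PySem.Int.ofStr? s with
  | none => rfl
  | some n =>
    simp only []
    obtain ⟨t, ht⟩ := chainGo_cons (n.toNat + 1) n (by omega)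
    have hne : chainGo (n.toNat + 1) n ≠ [] := by rw [ht]; simp
    rw [PySem.List.pyGetD_neg_one (chainGo (n.toNat + 1) n) 0 hne]
    have := fold_zip_eq (chainGo (n.toNat + 1) n) hne 0 1
    simp only [] at this
    rw [this, gchain_chainGo (n.toNat + 1) n (by omega)]
    ring_nf
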